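-- pv_equiv track=rewrite | github.com/Sam-Wonjae-Lee/TetrisAI | main.py | get_piece_bottom
-- ===== SOURCE A (Python) =====
-- from typing import List, Dict, Tuple
--
-- def tables_equal(t1, t2):
--     if len(t1) != len(t2):
--         return False
--     for i in range(len(t1)):
--         if t1[i] != t2[i]:
--             return False
--     return True
--
-- def add_tables(t1, t2):
--     result = []
--     for i in range(min(len(t1), len(t2))):
--         result.append(t1[i] + t2[i])
--     return result
--
-- def get_piece_bottom(piece_shape: List[List[int]]):
--     """
--     Returns the bottom row and offset of the tetromino piece.
--     offset is defined as how many empty rows are there below the piece's bottom row.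
--
--     piece_shape is from pieces_shapes.
--
--     Preconditions:
--         - piece_shape in pieces_shapes.values()
--
--     >>> get_piece_bottom(pieces_shapes[2])
--     ([0, 1, 0], 1)
--     """
--     row = piece_shape[-1].copy()
--     bottom = row.copy()
--     offset = 0
--     rows_equal = True
--
--     for i in range(len(piece_shape) - 2, -1, -1):
--         if tables_equal(piece_shape[i], row) and rows_equal:
--             bottom = add_tables(bottom, piece_shape[i])
--         else:
--             offset += 1
--             rows_equal = False
--
--     return bottom, offset
-- ===== SOURCE B (Python) =====
-- def get_piece_bottom(piece_shape):
--     last = piece_shape[-1]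
--     r = 0
--     for row in reversed(piece_shape[:-1]):
--         if row != last:
--             break
--         r += 1
--     return [x * (r + 1) for x in last], len(piece_shape) - 1 - r
-- ===== Notes on version B (the rewrite author's own statement) =====
-- stated objective: simpler
-- what changed: Replaces the element-wise add_tables accumulation and the rows_equal flag loop by a run-length count of trailing rows equal to the last row plus closed-form results: bottom = last_row scaled by (r+1), offset = len-1-r.
import Mathlib
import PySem

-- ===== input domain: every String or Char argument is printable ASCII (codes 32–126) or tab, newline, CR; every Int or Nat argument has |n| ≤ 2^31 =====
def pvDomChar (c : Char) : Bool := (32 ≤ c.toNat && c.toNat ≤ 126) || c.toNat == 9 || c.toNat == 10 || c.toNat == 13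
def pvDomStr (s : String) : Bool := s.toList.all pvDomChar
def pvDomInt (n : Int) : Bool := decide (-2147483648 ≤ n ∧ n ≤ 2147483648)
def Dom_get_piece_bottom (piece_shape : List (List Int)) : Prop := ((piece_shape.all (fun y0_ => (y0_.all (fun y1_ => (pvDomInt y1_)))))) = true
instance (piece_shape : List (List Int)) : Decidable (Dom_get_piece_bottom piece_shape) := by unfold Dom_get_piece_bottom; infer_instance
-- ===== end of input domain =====

-- B replaces A's element-wise add_tables accumulation and rows_equal flag by a run-length
-- count of trailing rows equal to the last row plus closed-form scaling/subtraction (simpler).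


-- ===== PORT A =====
def tables_equal (t1 t2 : List Int) : Bool :=
  if t1.length ≠ t2.length then false
  else (List.range t1.length).all (fun i => t1.getD i 0 == t2.getD i 0)

def add_tables (t1 t2 : List Int) : List Int :=
  (List.range (min t1.length t2.length)).map (fun i => t1.getD i 0 + t2.getD i 0)

def get_piece_bottom (piece_shape : List (List Int)) : List Int × Int :=
  match PySem.List.pyGet? piece_shape (-1) with
  | none => ([], 0)   -- piece_shape = []: Python raises IndexError; excluded by Pre_
  | some row =>
    let res := (PySem.List.pyRange ((piece_shape.length : Int) - 2) (-1) (-1)).foldl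
      (fun (st : List Int × Int × Bool) i =>
        if tables_equal (PySem.List.pyGetD piece_shape i []) row && st.2.2 then
          (add_tables st.1 (PySem.List.pyGetD piece_shape i []), st.2.1, st.2.2)
        else (st.1, st.2.1 + 1, false))
      (row, (0 : Int), true)
    (res.1, res.2.1)

-- ===== PORT B =====
-- length of the run of rows equal to `last`, scanning a (reversed) row list, stop at first mismatch
def runCount (last : List Int) : List (List Int) → Int
  | [] => 0
  | r :: rest => if r = last then 1 + runCount last rest else 0

def get_piece_bottom_alt (piece_shape : List (List Int)) : List Int × Int :=
  match PySem.List.pyGet? piece_shape (-1) with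
  | none => ([], 0)   -- piece_shape = []: Python raises IndexError; excluded by Pre_
  | some last =>
    let r := runCount last piece_shape.dropLast.reverse
    (last.map (fun x => x * (r + 1)), (piece_shape.length : Int) - 1 - r)

-- ===== PRECONDITION & SPEC =====
-- Pre_ excludes only the empty list, on which Python A raises IndexError (piece_shape[-1]).
def Pre_get_piece_bottom (piece_shape : List (List Int)) : Prop := piece_shape ≠ []
instance (piece_shape : List (List Int)) : Decidable (Pre_get_piece_bottom piece_shape) := by unfold Pre_get_piece_bottom; infer_instance
def pvWitness_get_piece_bottom : List (List Int) := [[1, 1, 1, 1]]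

def Spec_get_piece_bottom (piece_shape : List (List Int)) (out : List Int × Int) : Prop := out = get_piece_bottom_alt piece_shape
instance (piece_shape : List (List Int)) (out : List Int × Int) : Decidable (Spec_get_piece_bottom piece_shape out) := by unfold Spec_get_piece_bottom; infer_instance

-- ===== CLAIM (what is proved, stated in full; the proofs are below) =====
def Claim_equal_get_piece_bottom : Prop := ∀ (piece_shape : List (List Int)), Dom_get_piece_bottom piece_shape → Pre_get_piece_bottom piece_shape → Spec_get_piece_bottom piece_shape (get_piece_bottom piece_shape)

-- ===== LEMMAS AND PROOFS =====

-- A's loop body, folded over the row values themselves (rather than indices)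
def stepF (row : List Int) (st : List Int × Int × Bool) (x : List Int) : List Int × Int × Bool :=
  if tables_equal x row && st.2.2 then (add_tables st.1 x, st.2.1, st.2.2)
  else (st.1, st.2.1 + 1, false)

lemma tables_equal_iff (t1 t2 : List Int) : tables_equal t1 t2 = true ↔ t1 = t2 := by
  unfold tables_equal
  split_ifs with hl
  · simp only [Bool.false_eq_true, false_iff]
    intro h; exact hl (by rw [h])
  · push_neg at hl
    simp only [List.all_eq_true, List.mem_range, beq_iff_eq]
    constructor
    · intro h
      apply List.ext_getElem hl
      intro i h1 h2
      have := h i h1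
      rwa [List.getD_eq_getElem _ _ h1, List.getD_eq_getElem _ _ h2] at this
    · intro h i hi
      subst h; rfl

lemma add_tables_zip (t1 t2 : List Int) : add_tables t1 t2 = List.zipWith (· + ·) t1 t2 := by
  induction t1 generalizing t2 with
  | nil => simp [add_tables]
  | cons a t1 ih =>
    cases t2 with
    | nil => simp [add_tables]
    | cons b t2 =>
      simp only [add_tables, List.zipWith_cons_cons, List.length_cons]
      have hmin : min (t1.length + 1) (t2.length + 1) = min t1.length t2.length + 1 := by omega
      rw [hmin, List.range_succ_eq_map]
      simp only [List.map_cons, List.getD_cons_zero, List.map_map]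
      rw [← ih]
      rfl

lemma add_tables_mul (row : List Int) (k : Int) :
    add_tables (row.map (fun x => x * k)) row = row.map (fun x => x * (k + 1)) := by
  rw [add_tables_zip]
  induction row with
  | nil => rfl
  | cons a t ih =>
    simp only [List.map_cons, List.zipWith_cons_cons, ih, List.cons.injEq]
    exact ⟨by ring, trivial⟩

lemma runCount_cons_self (row : List Int) (t : List (List Int)) :
    runCount row (row :: t) = 1 + runCount row t := by
  simp [runCount]

lemma runCount_cons_ne (row h : List Int) (t : List (List Int)) (hne : h ≠ row) :
    runCount row (h :: t) = 0 := by
  simp [runCount, hne]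

lemma foldl_stepF_false (row b : List Int) (o : Int) (l : List (List Int)) :
    l.foldl (stepF row) (b, o, false) = (b, o + l.length, false) := by
  induction l generalizing o with
  | nil => simp
  | cons h t ih =>
    have hstep : stepF row (b, o, false) h = (b, o + 1, false) := by
      simp [stepF]
    rw [List.foldl_cons, hstep, ih]
    simp only [Prod.mk.injEq, List.length_cons]
    refine ⟨trivial, ?_, trivial⟩
    push_cast; ring

lemma foldl_stepF_true (row : List Int) (k o : Int) (l : List (List Int)) :
    l.foldl (stepF row) (row.map (fun x => x * k), o, true)
      = (row.map (fun x => x * (k + runCount row l)),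
         o + ((l.length : Int) - runCount row l),
         decide (runCount row l = (l.length : Int))) := by
  induction l generalizing k o with
  | nil => simp [runCount]
  | cons h t ih =>
    by_cases hrow : h = row
    · subst hrow
      have hte : tables_equal h h = true := (tables_equal_iff h h).mpr rfl
      have hstep : stepF h (h.map (fun x => x * k), o, true) h
          = (h.map (fun x => x * (k + 1)), o, true) := by
        simp [stepF, hte, add_tables_mul]
      rw [List.foldl_cons, hstep, ih, runCount_cons_self]
      simp only [Prod.mk.injEq, List.length_cons]
      refine ⟨?_, ?_, ?_⟩
      · congr 1; funext x; ring
      · push_cast; ring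
      · rw [decide_eq_decide]; push_cast; omega
    · have hte : tables_equal h row = false := by
        cases h' : tables_equal h row
        · rfl
        · exact absurd ((tables_equal_iff h row).mp h') hrow
      have hstep : stepF row (row.map (fun x => x * k), o, true) h
          = (row.map (fun x => x * k), o + 1, false) := by
        simp [stepF, hte]
      rw [List.foldl_cons, hstep, foldl_stepF_false, runCount_cons_ne _ _ _ hrow]
      simp only [Prod.mk.injEq, List.length_cons]
      refine ⟨?_, ?_, ?_⟩
      · congr 1; funext x; ring
      · push_cast; ring
      · have hne : ¬ ((0 : Int) = (t.length : Int) + 1) := by omega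
        push_cast
        simp [hne]

lemma map_range_getD (ps : List (List Int)) (m : Nat) (hm : m ≤ ps.length) :
    (List.range m).map (fun k => ps.getD k []) = ps.take m := by
  apply List.ext_getElem
  · simp [hm]
  · intro i h1 h2
    simp only [List.length_map, List.length_range] at h1
    have hi : i < ps.length := lt_of_lt_of_le h1 hm
    simp [List.getD_eq_getElem?_getD, List.getElem?_eq_getElem hi]

lemma index_list_eq (ps : List (List Int)) (hps : ps ≠ []) :
    (PySem.List.pyRange ((ps.length : Int) - 2) (-1) (-1)).map
      (fun i => PySem.List.pyGetD ps i []) = ps.dropLast.reverse := by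
  rw [PySem.List.pyRange_neg_one_eq_reverse]
  have h1 : (-1 : Int) + 1 = 0 := by norm_num
  have h2 : ((ps.length : Int) - 2) + 1 = (ps.length : Int) - 1 := by ring
  rw [h1, h2, List.map_reverse]
  congr 1
  have hlen : 1 ≤ ps.length := List.length_pos_of_ne_nil hps
  rw [PySem.List.pyRange_one]
  have ht : ((ps.length : Int) - 1 - 0).toNat = ps.length - 1 := by omega
  rw [ht, List.map_map]
  have : ((fun i => PySem.List.pyGetD ps i []) ∘ fun k : Nat => (0 : Int) + ↑k)
      = fun k : Nat => ps.getD k [] := by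
    funext k
    simp [PySem.List.pyGetD_natCast]
  rw [this, map_range_getD ps (ps.length - 1) (Nat.sub_le _ _), List.dropLast_eq_take]

lemma map_mul_one (row : List Int) : row.map (fun x => x * 1) = row := by
  simp

-- ===== VERDICT (by name: the statement is the Claim_ definition above) =====
theorem get_piece_bottom_spec : Claim_equal_get_piece_bottom := by
  intro ps _ hps
  unfold Spec_get_piece_bottom get_piece_bottom get_piece_bottom_alt
  have hget : PySem.List.pyGet? ps (-1) = some (ps.getLast hps) := by
    rw [PySem.List.pyGet?_neg_one, List.getLast?_eq_some_getLast hps]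
  simp only [hget]
  have hfold : (PySem.List.pyRange ((ps.length : Int) - 2) (-1) (-1)).foldl
      (fun (st : List Int × Int × Bool) i =>
        if tables_equal (PySem.List.pyGetD ps i []) (ps.getLast hps) && st.2.2 then
          (add_tables st.1 (PySem.List.pyGetD ps i []), st.2.1, st.2.2)
        else (st.1, st.2.1 + 1, false)) (ps.getLast hps, (0 : Int), true)
      = ps.dropLast.reverse.foldl (stepF (ps.getLast hps)) (ps.getLast hps, (0 : Int), true) := by
    rw [← index_list_eq ps hps, List.foldl_map]
    rfl
  have hft := foldl_stepF_true (ps.getLast hps) 1 0 ps.dropLast.reverse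
  rw [map_mul_one] at hft
  rw [hfold, hft]
  have hlen : 1 ≤ ps.length := List.length_pos_of_ne_nil hps
  have hl : ((ps.dropLast.reverse.length : Nat) : Int) = (ps.length : Int) - 1 := by
    simp only [List.length_reverse, List.length_dropLast]
    omega
  dsimp only
  refine Prod.ext ?_ ?_
  · dsimp only
    congr 1; funext x; ring
  · dsimp only
    rw [hl]; ring
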